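-- pv_equiv track=rewrite | github.com/quru/qis | src/imageserver/util.py | index_of_word_break
-- ===== SOURCE A (Python) =====
-- def index_of_word_break(val, from_index, forwards=True):
--     """
--     Returns the character index, forwards or backwards from from_index, where
--     a new word starts or ends.
--
--     Searching forwards, the character position 1 past the end of the next
--     word is returned, or the string length if this is reached first.
--
--     Searching backwards, the character position of the first letter of the
--     previous word is returned, or 0 if the beginning of the string is reached.
--     """
--     if val == '':
--         return 0
--     idx = from_index
--     if idx < 0:
--         idx = 0
--     if idx > len(val) - 1:
--         idx = len(val) - 1
--
--     delta = 1 if forwards else -1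
--     while idx >= 0 and idx < len(val):
--         test_idx = idx + delta
--         if test_idx < 0 or test_idx > len(val) - 1:
--             break
--         if val[test_idx] in [' ', '.', ',', ';', '\r', '\n']:
--             # Stop at this word break
--             return test_idx if forwards else idx
--         idx += delta
--     # No word break found
--     return len(val) if forwards else 0
-- ===== SOURCE B (Python) =====
-- _DELIMS = " .,;\r\n"
--
-- def index_of_word_break(val, from_index, forwards=True):
--     if val == '':
--         return 0
--     n = len(val)
--     idx = max(0, min(from_index, n - 1))
--     breaks = [i for i, c in enumerate(val) if c in _DELIMS]
--     if forwards:
--         return next((j for j in breaks if j > idx), n)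
--     return next((j + 1 for j in reversed(breaks) if j < idx), 0)
-- ===== Notes on version B (the rewrite author's own statement) =====
-- stated objective: alternative
-- what changed: A walks character by character in the chosen direction inside one while-loop; B builds the list of all delimiter positions once via an enumerate comprehension and then selects the first position after (forwards) or last position before (backwards, +1) the clamped index.
import Mathlib
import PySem

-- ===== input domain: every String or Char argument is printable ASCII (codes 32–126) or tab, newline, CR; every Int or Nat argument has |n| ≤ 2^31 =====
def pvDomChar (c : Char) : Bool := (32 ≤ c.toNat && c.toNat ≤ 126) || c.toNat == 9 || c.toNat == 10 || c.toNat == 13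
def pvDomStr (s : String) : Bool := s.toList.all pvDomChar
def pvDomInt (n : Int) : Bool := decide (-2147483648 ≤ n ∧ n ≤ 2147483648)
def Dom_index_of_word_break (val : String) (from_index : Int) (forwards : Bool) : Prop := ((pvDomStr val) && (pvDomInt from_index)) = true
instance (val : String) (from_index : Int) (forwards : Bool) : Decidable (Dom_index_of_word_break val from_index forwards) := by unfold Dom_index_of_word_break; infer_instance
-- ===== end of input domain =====

-- B replaces A's directional char-by-char while-loop with building the list of all
-- word-break positions once and selecting the first one after / last one before the
-- clamped index (objective: alternative decomposition, similar cost).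

-- the word-break delimiter characters (shared character class)
def iowbDelims : List Char := [' ', '.', ',', ';', '\r', '\n']

-- ===== PORT A =====
-- A's forward while-loop: repeatedly test idx+1, stop at a delimiter or the end
def iowbLoopF (cs : List Char) (n : Nat) (idx : Nat) : Int :=
  if n ≤ idx + 1 then (n : Int)
  else if iowbDelims.contains (cs.getD (idx + 1) ' ') then ((idx + 1 : Nat) : Int)
  else iowbLoopF cs n (idx + 1)
termination_by n - idx
decreasing_by omega

-- A's backward while-loop: repeatedly test idx-1, stop at a delimiter or index 0
def iowbLoopB (cs : List Char) : Nat → Int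
  | 0 => 0
  | j + 1 => if iowbDelims.contains (cs.getD j ' ') then ((j : Int) + 1) else iowbLoopB cs j

def index_of_word_break (val : String) (from_index : Int) (forwards : Bool) : Int :=
  if val = "" then 0
  else
    let cs := val.toList
    let n := cs.length
    let idx := if from_index < 0 then 0 else from_index
    let idx := if idx > (n : Int) - 1 then (n : Int) - 1 else idx
    if forwards then iowbLoopF cs n idx.toNat else iowbLoopB cs idx.toNat

-- ===== PORT B =====
-- B: all delimiter positions, in order (Python: [i for i, c in enumerate(val) if c in _DELIMS])
def iowbBreaks (cs : List Char) : List Int :=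
  (PySem.List.enumerate cs 0).filterMap (fun p => if iowbDelims.contains p.2 then some p.1 else none)

def index_of_word_break_alt (val : String) (from_index : Int) (forwards : Bool) : Int :=
  if val = "" then 0
  else
    let cs := val.toList
    let n : Int := (cs.length : Int)
    let idx := max 0 (min from_index (n - 1))
    let breaks := iowbBreaks cs
    if forwards then
      match breaks.find? (fun j => decide (idx < j)) with
      | some j => j
      | none => n
    else
      match breaks.reverse.find? (fun j => decide (j < idx)) with
      | some j => j + 1
      | none => 0

-- ===== PRECONDITION & SPEC =====
def Spec_index_of_word_break (val : String) (from_index : Int) (forwards : Bool) (out : Int) : Prop := out = index_of_word_break_alt val from_index forwards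
instance (val : String) (from_index : Int) (forwards : Bool) (out : Int) : Decidable (Spec_index_of_word_break val from_index forwards out) := by unfold Spec_index_of_word_break; infer_instance

-- ===== CLAIM (what is proved, stated in full; the proofs are below) =====
def Claim_equal_index_of_word_break : Prop := ∀ (val : String) (from_index : Int) (forwards : Bool), Dom_index_of_word_break val from_index forwards → Spec_index_of_word_break val from_index forwards (index_of_word_break val from_index forwards)

-- ===== LEMMAS AND PROOFS =====

-- find? is unchanged when the predicates agree on the list's elements
theorem iowb_find?_congr {α : Type} {p q : α → Bool} : ∀ (l : List α), (∀ x ∈ l, p x = q x) → l.find? p = l.find? q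
  | [], _ => rfl
  | x :: l, h => by
    simp only [List.find?_cons]
    rw [h x (by simp)]
    cases hq : q x with
    | true => rfl
    | false => exact iowb_find?_congr l (fun y hy => h y (by simp [hy]))

-- filterMap over enumerate = filtered index range, cast to Int
theorem iowb_enum_aux (C : Char → Bool) : ∀ (cs : List Char) (s : Nat),
    (PySem.List.enumerate cs (s : Int)).filterMap (fun p => if C p.2 then some p.1 else none)
    = ((List.range' s cs.length).filter (fun k => C (cs.getD (k - s) ' '))).map (fun k : Nat => (k : Int))
  | [], s => by simp [PySem.List.enumerate_nil]
  | c :: t, s => by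
    rw [PySem.List.enumerate_cons]
    simp only [List.filterMap_cons]
    rw [show ((s : Int) + 1) = ((s + 1 : Nat) : Int) by push_cast; ring, iowb_enum_aux C t (s + 1)]
    simp only [List.length_cons, List.range'_succ, List.filter_cons]
    have h0 : (c :: t).getD (s - s) ' ' = c := by simp
    rw [h0]
    have htail : (List.range' (s + 1) t.length).filter (fun k => C ((c :: t).getD (k - s) ' '))
        = (List.range' (s + 1) t.length).filter (fun k => C (t.getD (k - (s + 1)) ' ')) := by
      apply List.filter_congr
      intro k hk
      obtain ⟨i, hi, rfl⟩ := List.mem_range'.mp hk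
      have h2 : s + 1 + i - s = i + 1 := by omega
      simp [h2]
    rw [htail]
    cases hC : C c <;> simp

theorem iowbBreaks_eq (cs : List Char) :
    iowbBreaks cs = ((List.range cs.length).filter (fun k => iowbDelims.contains (cs.getD k ' '))).map (fun k : Nat => (k : Int)) := by
  have := iowb_enum_aux (fun c => iowbDelims.contains c) cs 0
  simpa [iowbBreaks, List.range_eq_range'] using this

-- A's forward loop finds the first delimiter position strictly after idx
theorem iowbLoopF_eq (cs : List Char) (n : Nat) (idx : Nat) :
    iowbLoopF cs n idx =
      match (List.range' (idx + 1) (n - (idx + 1))).find? (fun k => iowbDelims.contains (cs.getD k ' ')) with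
      | some k => (k : Int)
      | none => (n : Int) := by
  fun_induction iowbLoopF cs n idx with
  | case1 idx h => rw [show n - (idx + 1) = 0 by omega]; simp
  | case2 idx h hd =>
    rw [show n - (idx + 1) = (n - (idx + 2)) + 1 by omega, List.range'_succ]
    simp at hd
    simp [hd]
  | case3 idx h hd ih =>
    rw [show n - (idx + 1) = (n - (idx + 2)) + 1 by omega, List.range'_succ]
    simp at hd
    simp [hd]
    simpa using ih

-- A's backward loop finds the last delimiter position strictly before idx, plus one
theorem iowbLoopB_eq (cs : List Char) (idx : Nat) :
    iowbLoopB cs idx =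
      match ((List.range idx).reverse).find? (fun k => iowbDelims.contains (cs.getD k ' ')) with
      | some k => (k : Int) + 1
      | none => 0 := by
  induction idx with
  | zero => simp [iowbLoopB]
  | succ j ih =>
    rw [List.range_succ]
    simp only [List.reverse_append, List.reverse_singleton, List.singleton_append, List.find?_cons]
    by_cases hd : cs[j]?.getD ' ' ∈ iowbDelims
    · have hd' : iowbDelims.contains (cs.getD j ' ') = true := by simpa [List.getD] using hd
      simp [iowbLoopB, hd]
    · have hd' : iowbDelims.contains (cs.getD j ' ') = false := by simpa [List.getD] using hd
      simp only [iowbLoopB, hd']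
      simp
      simpa using ih

-- a find? over range n with an 'index > k' conjunct = find? over the tail range
theorem iowb_rangeF (P : Nat → Bool) (k n : Nat) (hk : k < n) :
    (List.range n).find? (fun a => P a && decide (k < a)) = (List.range' (k + 1) (n - (k + 1))).find? P := by
  have h0 : List.range' 0 (k + 1) ++ List.range' (k + 1) (n - (k + 1)) = List.range' 0 n := by
    have h := @List.range'_append_1 0 (k + 1) (n - (k + 1))
    rw [Nat.zero_add] at h
    rwa [show (k + 1) + (n - (k + 1)) = n by omega] at h
  rw [List.range_eq_range', ← h0, List.find?_append]
  have h1 : (List.range' 0 (k + 1)).find? (fun a => P a && decide (k < a)) = none := by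
    rw [List.find?_eq_none]
    intro x hx
    obtain ⟨i, hi, rfl⟩ := List.mem_range'.mp hx
    simp; omega
  rw [h1, Option.none_or]
  apply iowb_find?_congr
  intro x hx
  obtain ⟨i, hi, rfl⟩ := List.mem_range'.mp hx
  simp
  exact fun _ => by omega

-- a backwards find? over range n with an 'index < k' conjunct = find? over the reversed head range
theorem iowb_rangeB (P : Nat → Bool) (k n : Nat) (hk : k ≤ n) :
    ((List.range n).reverse).find? (fun a => P a && decide (a < k)) = ((List.range k).reverse).find? P := by
  have h0 : List.range' 0 k ++ List.range' k (n - k) = List.range' 0 n := by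
    have h := @List.range'_append_1 0 k (n - k)
    rw [Nat.zero_add] at h
    rwa [show k + (n - k) = n by omega] at h
  rw [show (List.range n).reverse = (List.range' k (n - k)).reverse ++ (List.range k).reverse by
      rw [← List.reverse_append, List.range_eq_range', ← h0, List.range_eq_range'],
    List.find?_append]
  have h1 : ((List.range' k (n - k)).reverse).find? (fun a => P a && decide (a < k)) = none := by
    rw [List.find?_eq_none]
    intro x hx
    obtain ⟨i, hi, rfl⟩ := List.mem_range'.mp (List.mem_reverse.mp hx)
    simp only [Bool.and_eq_true, decide_eq_true_eq, not_and]
    exact fun _ => by omega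
  rw [h1, Option.none_or]
  apply iowb_find?_congr
  intro x hx
  have hx' := List.mem_range.mp (List.mem_reverse.mp hx)
  simp
  exact fun _ => hx'

-- B's forward selection equals A's forward loop
theorem iowb_bridgeF (cs : List Char) (k : Nat) (hk : k < cs.length) :
    (match (iowbBreaks cs).find? (fun j => decide ((k : Int) < j)) with
     | some j => j
     | none => ((cs.length : Nat) : Int)) = iowbLoopF cs cs.length k := by
  rw [iowbBreaks_eq, List.find?_map]
  have hcongr : (List.filter (fun m => iowbDelims.contains (cs.getD m ' ')) (List.range cs.length)).find?
        ((fun j => decide ((k : Int) < j)) ∘ (fun m : Nat => (m : Int)))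
      = (List.range cs.length).find? (fun a => iowbDelims.contains (cs.getD a ' ') && decide (k < a)) := by
    rw [List.find?_filter]
    apply iowb_find?_congr
    intro x _
    simp [Nat.cast_lt]
  rw [hcongr, iowb_rangeF _ k cs.length hk, iowbLoopF_eq]
  cases ((List.range' (k + 1) (cs.length - (k + 1))).find? (fun m => iowbDelims.contains (cs.getD m ' '))) <;> simp

-- B's backward selection equals A's backward loop
theorem iowb_bridgeB (cs : List Char) (k : Nat) (hk : k < cs.length) :
    (match (iowbBreaks cs).reverse.find? (fun j => decide (j < (k : Int))) with
     | some j => j + 1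
     | none => 0) = iowbLoopB cs k := by
  rw [iowbBreaks_eq, ← List.map_reverse, List.find?_map]
  have hcongr : ((List.filter (fun m => iowbDelims.contains (cs.getD m ' ')) (List.range cs.length)).reverse).find?
        ((fun j => decide (j < (k : Int))) ∘ (fun m : Nat => (m : Int)))
      = ((List.range cs.length).reverse).find? (fun a => iowbDelims.contains (cs.getD a ' ') && decide (a < k)) := by
    rw [← List.filter_reverse, List.find?_filter]
    apply iowb_find?_congr
    intro x _
    simp [Nat.cast_lt]
  rw [hcongr, iowb_rangeB _ k cs.length (le_of_lt hk), iowbLoopB_eq]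
  cases (((List.range k).reverse).find? (fun m => iowbDelims.contains (cs.getD m ' '))) <;> simp

-- the two ports agree on every input
theorem iowb_main (val : String) (fi : Int) (fw : Bool) :
    index_of_word_break val fi fw = index_of_word_break_alt val fi fw := by
  unfold index_of_word_break index_of_word_break_alt
  by_cases hv : val = ""
  · simp [hv]
  · simp only [if_neg hv]
    have hn : 1 ≤ val.toList.length := by
      rcases Nat.eq_zero_or_pos val.toList.length with h | h
      · exact absurd (String.toList_eq_nil_iff.mp (List.eq_nil_of_length_eq_zero h)) hv
      · exact h
    have hL : (1 : Int) ≤ (val.toList.length : Int) := by exact_mod_cast hn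
    set cs := val.toList with hcs
    set k : Nat := (if (if fi < 0 then 0 else fi) > (cs.length : Int) - 1 then (cs.length : Int) - 1
                    else (if fi < 0 then 0 else fi)).toNat with hk
    have hkk : ((k : Int)) = max 0 (min fi ((cs.length : Int) - 1)) := by
      rw [hk]
      split_ifs with h1 h2 h3 <;> rw [Int.toNat_of_nonneg (by omega)] <;> omega
    have hklt : k < cs.length := by
      by_contra hc
      have : (cs.length : Int) ≤ (k : Int) := by exact_mod_cast Nat.le_of_not_lt hc
      omega
    cases fw with
    | true =>
      simp only [if_true]
      rw [← hkk]
      exact (iowb_bridgeF cs k hklt).symm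
    | false =>
      simp only [Bool.false_eq_true, if_false]
      rw [← hkk]
      exact (iowb_bridgeB cs k hklt).symm

-- ===== VERDICT (by name: the statement is the Claim_ definition above) =====
theorem index_of_word_break_spec : Claim_equal_index_of_word_break := by
  intro val fi fw _
  unfold Spec_index_of_word_break
  exact iowb_main val fi fw
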